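-- pv_equiv track=rewrite | github.com/wzy6642/2018-Finals-tzmcm-Rank1 | code/1.2increase_decrease.py | A2_max_location
-- ===== SOURCE A (Python) =====
-- from copy import deepcopy
--
-- def A2_max_location(data):
--     Location = []
--     for i in data:
--         sub_location = []
--         for j in i:
--             temp = list(deepcopy(j))
--             location = temp.index(max(temp))
--             sub_location.append(location)
--         Location.append(sub_location)
--     return Location
-- ===== SOURCE B (Python) =====
-- def _argmax(seq):
--     # single running-max scan; first maximum wins ties
--     temp = list(seq)
--     best_i, best_v = 0, temp[0]
--     for idx, x in enumerate(temp):
--         if x > best_v: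
--             best_i, best_v = idx, x
--     return best_i
--
--
-- def A2_max_location(data):
--     return [[_argmax(j) for j in group] for group in data]
-- ===== Notes on version B (the rewrite author's own statement) =====
-- stated objective: simpler
-- what changed: Replaces the two-pass max()+.index() (plus a useless deepcopy) with one running-best scan per innermost list, and the explicit accumulator loops with comprehensions.
import Mathlib
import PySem

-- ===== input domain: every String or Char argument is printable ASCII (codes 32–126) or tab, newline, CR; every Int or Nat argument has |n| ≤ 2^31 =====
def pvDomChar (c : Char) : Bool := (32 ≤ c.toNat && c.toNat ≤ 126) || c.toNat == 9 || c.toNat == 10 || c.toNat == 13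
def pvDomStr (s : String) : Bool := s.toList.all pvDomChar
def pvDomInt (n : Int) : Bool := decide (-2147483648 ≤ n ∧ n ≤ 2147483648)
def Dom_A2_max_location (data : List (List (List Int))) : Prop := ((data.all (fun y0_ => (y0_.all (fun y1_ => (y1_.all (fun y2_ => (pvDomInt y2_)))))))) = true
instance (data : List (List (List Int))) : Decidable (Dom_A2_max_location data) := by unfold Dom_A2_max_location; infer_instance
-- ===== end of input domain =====

-- B replaces the two-pass max()+.index() (and the useless deepcopy) with one running-best scan: simpler.

-- ===== PORT A =====
def A2_max_location (data : List (List (List Int))) : List (List Int) :=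
  data.foldl (fun Location i =>
    Location ++ [ i.foldl (fun sub j =>
        let temp := j
        let location : Int :=
          match PySem.List.max? temp (fun y => y) with
          | some m => ((PySem.List.index? temp m).getD 0 : Nat)
          | none => 0   -- Python raises ValueError on an empty innermost list; excluded by Pre_
        sub ++ [location]) [] ]) []

-- ===== PORT B =====
def pvArgmax (seq : List Int) : Int :=
  let temp := seq
  let r := (PySem.List.enumerate temp 0).foldl
      (fun (b : Int × Int) (p : Int × Int) => if p.2 > b.2 then p else b)
      (0, PySem.List.pyGetD temp 0 0)   -- temp[0]; IndexError on [] is excluded by Pre_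
  r.1

def A2_max_location_alt (data : List (List (List Int))) : List (List Int) :=
  data.map (fun group => group.map pvArgmax)

-- ===== PRECONDITION & SPEC =====
-- Pre_ excludes inputs containing an empty innermost list, where Python A raises ValueError (max of empty sequence).
def Pre_A2_max_location (data : List (List (List Int))) : Prop :=
  ∀ i ∈ data, ∀ j ∈ i, j ≠ []
instance (data : List (List (List Int))) : Decidable (Pre_A2_max_location data) := by
  unfold Pre_A2_max_location; infer_instance

def pvWitness_A2_max_location : List (List (List Int)) := [[[3, 1, 3], [1, 2]], [[-1]]]

def Spec_A2_max_location (data : List (List (List Int))) (out : List (List Int)) : Prop := out = A2_max_location_alt data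
instance (data : List (List (List Int))) (out : List (List Int)) : Decidable (Spec_A2_max_location data out) := by unfold Spec_A2_max_location; infer_instance

-- ===== CLAIM (what is proved, stated in full; the proofs are below) =====
def Claim_equal_A2_max_location : Prop := ∀ (data : List (List (List Int))), Dom_A2_max_location data → Pre_A2_max_location data → Spec_A2_max_location data (A2_max_location data)

-- ===== LEMMAS AND PROOFS =====

-- The running-best fold over `enumerate t k` starting from best (bi, bv): the final best value
-- is the running max of bv over t, and the final best index is k + (first index of that max in t)
-- when some element strictly beats bv, else bi.
lemma pv_fold_enum_spec (t : List Int) : ∀ (k bi bv : Int),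
    (PySem.List.enumerate t k).foldl
      (fun (b : Int × Int) (p : Int × Int) => if p.2 > b.2 then p else b) (bi, bv)
    = (if t.foldl max bv > bv
        then k + (((PySem.List.index? t (t.foldl max bv)).getD 0 : Nat) : Int)
        else bi,
       t.foldl max bv) := by
  induction t with
  | nil => intro k bi bv; simp
  | cons x s ih =>
    intro k bi bv
    rw [PySem.List.enumerate_cons]
    simp only [List.foldl_cons]
    by_cases hx : x > bv
    · simp only [if_pos hx, ih (k+1) k x]
      have hmax : max bv x = x := max_eq_right (le_of_lt hx)
      rw [hmax]
      have hge : x ≤ s.foldl max x := (PySem.List.le_foldl_max s x).1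
      have hcond : s.foldl max x > bv := lt_of_lt_of_le hx hge
      rw [if_pos hcond]
      by_cases hs : s.foldl max x > x
      · have hne : x ≠ s.foldl max x := by omega
        rw [PySem.List.index?_cons_of_ne s hne]
        have hmem : s.foldl max x ∈ s := by
          rcases PySem.List.foldl_max_mem s x with h | h
          · omega
          · exact h
        rw [if_pos hs]
        rcases (PySem.List.index?_isSome_iff (xs := s) (v := s.foldl max x)).2 hmem |> Option.isSome_iff_exists.mp with ⟨n, hn⟩
        rw [hn]
        simp
        ring
      · have hxeq : s.foldl max x = x := le_antisymm (by omega) hge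
        rw [hxeq, if_neg (by omega), PySem.List.index?_cons_self]
        simp
    · simp only [if_neg hx, ih (k+1) bi bv]
      have hmax : max bv x = bv := max_eq_left (by omega)
      rw [hmax]
      by_cases hs : s.foldl max bv > bv
      · rw [if_pos hs, if_pos hs]
        have hne : x ≠ s.foldl max bv := by omega
        rw [PySem.List.index?_cons_of_ne s hne]
        have hmem : s.foldl max bv ∈ s := by
          rcases PySem.List.foldl_max_mem s bv with h | h
          · omega
          · exact h
        rcases (PySem.List.index?_isSome_iff (xs := s) (v := s.foldl max bv)).2 hmem |> Option.isSome_iff_exists.mp with ⟨n, hn⟩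
        rw [hn]
        simp
        ring
      · rw [if_neg hs, if_neg hs]

-- A's two-pass max+index equals B's single running-best scan on a nonempty list.
lemma pv_argmax_eq (j : List Int) (hj : j ≠ []) :
    (match PySem.List.max? j (fun y => y) with
      | some m => (((PySem.List.index? j m).getD 0 : Nat) : Int)
      | none => 0) = pvArgmax j := by
  obtain ⟨h, t, rfl⟩ := List.exists_cons_of_ne_nil hj
  rw [PySem.List.max?_id_cons]
  simp only [pvArgmax]
  rw [PySem.List.enumerate_cons, PySem.List.pyGetD_zero_cons]
  simp only [List.foldl_cons, lt_irrefl, if_false, zero_add]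
  have := pv_fold_enum_spec t 1 0 h
  simp only [gt_iff_lt] at this
  rw [this]
  by_cases hs : t.foldl max h > h
  · rw [if_pos hs]
    have hne : h ≠ t.foldl max h := by omega
    rw [PySem.List.index?_cons_of_ne t hne]
    have hmem : t.foldl max h ∈ t := by
      rcases PySem.List.foldl_max_mem t h with h' | h'
      · omega
      · exact h'
    rcases (PySem.List.index?_isSome_iff t (t.foldl max h)).2 hmem |> Option.isSome_iff_exists.mp with ⟨n, hn⟩
    rw [hn]
    simp
    ring
  · have heq : t.foldl max h = h := le_antisymm (by omega) (PySem.List.le_foldl_max t h).1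
    rw [heq, if_neg (lt_irrefl h), PySem.List.index?_cons_self]
    simp

-- ===== VERDICT (by name: the statement is the Claim_ definition above) =====
theorem A2_max_location_spec : Claim_equal_A2_max_location := by
  intro data _ hpre
  unfold Spec_A2_max_location A2_max_location A2_max_location_alt
  rw [PySem.List.foldl_append_singleton_eq_map]
  refine List.map_congr_left (fun i hi => ?_)
  rw [PySem.List.foldl_append_singleton_eq_map]
  exact List.map_congr_left (fun j hj => pv_argmax_eq j (hpre i hi j hj))
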